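-- pv_equiv track=rewrite | github.com/Dukkkk/itcsi250 | Lab4/lab04_1.py | count_sqrts
-- ===== SOURCE A (Python) =====
-- def count_sqrts(nums_list):
--     """
--     nums_list: a list
--     Assumes that nums_list only contains positive numbers and that there are no duplicates.
--     Returns how many elements in nums_list are exact squares of elements in the same list, including itself.
--     """
--     # Your code here
--     count = 0
--     j = 0
--     for num in nums_list:
--         for j in nums_list:
--             if num == j ** 2:
--                 count += 1
--                 break
--     return count
-- ===== SOURCE B (Python) =====
-- def count_sqrts(nums_list):
--     squares = {j * j for j in nums_list}
--     return sum(1 for num in nums_list if num in squares)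
-- ===== Notes on version B (the rewrite author's own statement) =====
-- stated objective: faster
-- what changed: B precomputes a set of all members' squares once and then makes a single counting pass with O(1) membership tests, replacing A's nested per-element rescan with break.
import Mathlib
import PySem

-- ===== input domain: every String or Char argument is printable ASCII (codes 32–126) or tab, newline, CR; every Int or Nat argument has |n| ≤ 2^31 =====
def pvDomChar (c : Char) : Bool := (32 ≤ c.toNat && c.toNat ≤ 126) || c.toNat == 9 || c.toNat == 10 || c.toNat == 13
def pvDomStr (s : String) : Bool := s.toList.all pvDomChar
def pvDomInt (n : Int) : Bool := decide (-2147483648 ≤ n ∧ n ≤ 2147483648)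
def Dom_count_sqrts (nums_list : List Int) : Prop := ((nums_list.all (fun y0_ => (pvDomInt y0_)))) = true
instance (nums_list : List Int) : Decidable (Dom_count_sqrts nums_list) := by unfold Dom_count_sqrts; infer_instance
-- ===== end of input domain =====

-- B precomputes the set of members' squares once, then counts in a single pass (vs A's nested rescan).


-- ===== PORT A =====
-- inner 'for j in nums_list: if num == j ** 2: count += 1; break'
def countSqrtsInner (num : Int) (l : List Int) (count : Int) : Int :=
  match l with
  | [] => count
  | j :: rest => if num = j ^ 2 then count + 1 else countSqrtsInner num rest count

def count_sqrts (nums_list : List Int) : Int :=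
  nums_list.foldl (fun count num => countSqrtsInner num nums_list count) 0

-- ===== PORT B =====
def count_sqrts_alt (nums_list : List Int) : Int :=
  let squares : PySem.Set Int := PySem.Set.ofList (nums_list.map (fun j => j * j))
  nums_list.foldl (fun acc num => acc + (if PySem.Set.contains squares num then 1 else 0)) 0

-- ===== PRECONDITION & SPEC =====
def Spec_count_sqrts (nums_list : List Int) (out : Int) : Prop := out = count_sqrts_alt nums_list
instance (nums_list : List Int) (out : Int) : Decidable (Spec_count_sqrts nums_list out) := by unfold Spec_count_sqrts; infer_instance

-- ===== CLAIM (what is proved, stated in full; the proofs are below) =====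
def Claim_equal_count_sqrts : Prop := ∀ (nums_list : List Int), Dom_count_sqrts nums_list → Spec_count_sqrts nums_list (count_sqrts nums_list)

-- ===== LEMMAS AND PROOFS =====
theorem countSqrtsInner_eq (num : Int) (l : List Int) (count : Int) :
    countSqrtsInner num l count = count + (if l.any (fun j => num = j ^ 2) then 1 else 0) := by
  induction l with
  | nil => simp [countSqrtsInner]
  | cons j rest ih =>
    simp only [countSqrtsInner, List.any_cons]
    by_cases h : num = j ^ 2 <;> simp [h, ih]

theorem contains_squares (nums : List Int) (num : Int) :
    PySem.Set.contains (PySem.Set.ofList (nums.map (fun j => j * j))) num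
      = nums.any (fun j => num = j ^ 2) := by
  simp only [PySem.Set.contains]
  rw [Bool.eq_iff_iff]
  simp only [List.contains_iff_mem, PySem.Set.mem_ofList, List.mem_map, List.any_eq_true,
    decide_eq_true_eq]
  constructor
  · rintro ⟨j, hj, rfl⟩; exact ⟨j, hj, by ring⟩
  · rintro ⟨j, hj, rfl⟩; exact ⟨j, hj, by ring⟩

-- ===== VERDICT (by name: the statement is the Claim_ definition above) =====
theorem count_sqrts_spec : Claim_equal_count_sqrts := by
  intro nums _
  unfold Spec_count_sqrts count_sqrts count_sqrts_alt
  simp only [countSqrtsInner_eq, contains_squares]
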